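-- pv_equiv track=rewrite | github.com/nagaraju291990/Indic_Shallow_Parser | run_shallow_parser_cb.py | parse_morph
-- ===== SOURCE A (Python) =====
-- def parse_morph(morph_str):
--     feats = {"Gender": "", "Number": "", "Person": "", "Case": "", "Vib": ""}
--     for item in morph_str.split("|"):
--         if "=" in item:
--             k, v = item.split("=", 1)
--             if k in feats:
--                 feats[k] = v
--     return feats
-- ===== SOURCE B (Python) =====
-- def parse_morph(morph_str):
--     items = morph_str.split("|")
--
--     def value_of(name):
--         # last-write-wins = first match scanning from the end
--         for it in reversed(items):
--             if "=" in it: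
--                 k, v = it.split("=", 1)
--                 if k == name:
--                     return v
--         return ""
--
--     return {name: value_of(name) for name in ("Gender", "Number", "Person", "Case", "Vib")}
-- ===== Notes on version B (the rewrite author's own statement) =====
-- stated objective: alternative
-- what changed: B keeps no dictionary at all: for each of the five fixed feature names it does a separate find-first search over the reversed token list (last-write-wins becomes first match from the end), instead of A's single accumulating pass into preinitialized slots.
import Mathlib
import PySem

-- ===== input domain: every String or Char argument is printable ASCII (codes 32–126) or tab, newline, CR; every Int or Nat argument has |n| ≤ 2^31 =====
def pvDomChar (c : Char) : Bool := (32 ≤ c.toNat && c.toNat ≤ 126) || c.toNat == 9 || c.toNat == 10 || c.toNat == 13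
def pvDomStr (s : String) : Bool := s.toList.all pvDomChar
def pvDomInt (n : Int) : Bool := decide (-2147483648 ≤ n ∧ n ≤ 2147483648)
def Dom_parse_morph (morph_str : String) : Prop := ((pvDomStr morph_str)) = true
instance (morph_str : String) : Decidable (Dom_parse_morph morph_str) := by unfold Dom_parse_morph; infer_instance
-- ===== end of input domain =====

-- B keeps no dictionary: for each of the five fixed feature names it does a separate
-- find-first search over the reversed token list (last-write-wins = first match from the end),
-- instead of A's single accumulating pass into preinitialized slots (objective: alternative).

-- ===== PORT A =====
-- one loop step of A: if "=" in item: k, v = item.split("=", 1); if k in feats: feats[k] = v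
-- (the match on split("=", 1) is a totality guard: with "=" in item the split always yields [k, v])
def parseMorphStepA (feats : PySem.Dict String String) (item : String) : PySem.Dict String String :=
  if PySem.Str.isIn "=" item then
    match PySem.Str.splitMax? item "=" 1 with
    | some [k, v] => if feats.contains k then feats.insert k v else feats
    | _ => feats
  else feats

def parse_morph (morph_str : String) : List (String × String) :=
  let feats : PySem.Dict String String :=
    PySem.Dict.ofList [("Gender", ""), ("Number", ""), ("Person", ""), ("Case", ""), ("Vib", "")]
  -- morph_str.split("|"): split? is none only for an empty separator, so the [] arm is unreachable
  match PySem.Str.split? morph_str "|" with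
  | some items => (items.foldl parseMorphStepA feats).items
  | none => []

-- ===== PORT B =====
-- B's value_of(name): walk reversed(items); on the first token with "=" whose key equals name,
-- return its value; fall off the end → "" (same totality guard on the shape of split("=", 1))
def parseMorphValueOf (revItems : List String) (name : String) : String :=
  match revItems with
  | [] => ""
  | it :: rest =>
    if PySem.Str.isIn "=" it then
      match PySem.Str.splitMax? it "=" 1 with
      | some [k, v] => if k == name then v else parseMorphValueOf rest name
      | _ => parseMorphValueOf rest name
    else parseMorphValueOf rest name

def parse_morph_alt (morph_str : String) : List (String × String) :=
  match PySem.Str.split? morph_str "|" with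
  | some items =>
    ["Gender", "Number", "Person", "Case", "Vib"].map
      (fun name => (name, parseMorphValueOf items.reverse name))
  | none => []

-- ===== PRECONDITION & SPEC =====
def Spec_parse_morph (morph_str : String) (out : List (String × String)) : Prop := out = parse_morph_alt morph_str
instance (morph_str : String) (out : List (String × String)) : Decidable (Spec_parse_morph morph_str out) := by unfold Spec_parse_morph; infer_instance

-- ===== CLAIM (what is proved, stated in full; the proofs are below) =====
def Claim_equal_parse_morph : Prop := ∀ (morph_str : String), Dom_parse_morph morph_str → Spec_parse_morph morph_str (parse_morph morph_str)

-- ===== LEMMAS AND PROOFS =====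

def pvNames : List String := ["Gender", "Number", "Person", "Case", "Vib"]

-- the k=v pair a single token contributes for key `name`, if any (mirrors one guarded loop body)
def pvMatch? (it name : String) : Option String :=
  if PySem.Str.isIn "=" it then
    match PySem.Str.splitMax? it "=" 1 with
    | some [k, v] => if k == name then some v else none
    | _ => none
  else none

-- B's reversed search is find-first over pvMatch?, defaulting to ""
theorem pvValueOf_eq (revItems : List String) (name : String) :
    parseMorphValueOf revItems name =
      (revItems.findSome? (fun it => pvMatch? it name)).getD "" := by
  induction revItems with
  | nil => rfl
  | cons it rest ih =>
    rw [List.findSome?_cons]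
    unfold parseMorphValueOf
    by_cases hin : PySem.Str.isIn "=" it = true
    · rw [if_pos hin]
      cases hsp : PySem.Str.splitMax? it "=" 1 with
      | none =>
        have hm : pvMatch? it name = none := by unfold pvMatch?; rw [if_pos hin, hsp]
        rw [hm]; exact ih
      | some l =>
        match l with
        | [] =>
          have hm : pvMatch? it name = none := by unfold pvMatch?; rw [if_pos hin, hsp]
          rw [hm]; exact ih
        | [_] =>
          have hm : pvMatch? it name = none := by unfold pvMatch?; rw [if_pos hin, hsp]
          rw [hm]; exact ih
        | _ :: _ :: _ :: _ =>
          have hm : pvMatch? it name = none := by unfold pvMatch?; rw [if_pos hin, hsp]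
          rw [hm]; exact ih
        | [k, v] =>
          have hm : pvMatch? it name = if k == name then some v else none := by
            unfold pvMatch?; rw [if_pos hin, hsp]
          rw [hm]
          by_cases hk : (k == name) = true
          · simp [hk]
          · simp only [hk, Bool.false_eq_true, if_false]
            exact ih
    · have hm : pvMatch? it name = none := by unfold pvMatch?; rw [if_neg hin]
      rw [if_neg hin, hm]; exact ih

-- findSome? over a snoc: the appended last element only matters when the front found nothing
theorem pvFindSome?_append_single {α β : Type} (l : List α) (x : α) (f : α → Option β) :
    (l ++ [x]).findSome? f = ((l.findSome? f).or (f x)) := by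
  induction l with
  | nil => cases hfx : f x <;> simp [hfx]
  | cons a l ih => cases hfa : f a <;> simp [hfa, ih]

-- the invariant tying A's slot dict after the fold over L to B's reversed search
-- (g is the fallback: the slot contents before L is processed)
theorem pvFold_char (L : List String) (F : PySem.Dict String String) (g : String → String)
    (hF : F.items = pvNames.map (fun n => (n, g n))) :
    (L.foldl parseMorphStepA F).items =
      pvNames.map (fun n => (n, (L.reverse.findSome? (fun it => pvMatch? it n)).getD (g n))) := by
  induction L generalizing F g with
  | nil => simpa using hF
  | cons item rest ih =>
    have hkeys : F.keys = pvNames := by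
      unfold PySem.Dict.keys; rw [hF]; simp [pvNames]
    have hstep : (parseMorphStepA F item).items =
        pvNames.map (fun n => (n, ((pvMatch? item n).getD (g n)))) := by
      unfold parseMorphStepA
      by_cases hin : PySem.Str.isIn "=" item = true
      · rw [if_pos hin]
        cases hsp : PySem.Str.splitMax? item "=" 1 with
        | none =>
          rw [hF]
          refine List.map_congr_left (fun n _ => ?_)
          have hm : pvMatch? item n = none := by unfold pvMatch?; rw [if_pos hin, hsp]
          rw [hm]; rfl
        | some l =>
          match l with
          | [] =>
            rw [hF]
            refine List.map_congr_left (fun n _ => ?_)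
            have hm : pvMatch? item n = none := by unfold pvMatch?; rw [if_pos hin, hsp]
            rw [hm]; rfl
          | [_] =>
            rw [hF]
            refine List.map_congr_left (fun n _ => ?_)
            have hm : pvMatch? item n = none := by unfold pvMatch?; rw [if_pos hin, hsp]
            rw [hm]; rfl
          | _ :: _ :: _ :: _ =>
            rw [hF]
            refine List.map_congr_left (fun n _ => ?_)
            have hm : pvMatch? item n = none := by unfold pvMatch?; rw [if_pos hin, hsp]
            rw [hm]; rfl
          | [k, v] =>
            simp only
            have hm : ∀ n, pvMatch? item n = if k == n then some v else none := by
              intro n; unfold pvMatch?; rw [if_pos hin, hsp]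
            by_cases hk : k ∈ pvNames
            · have hc : F.contains k = true := (PySem.Dict.contains_iff_mem_keys F k).2 (hkeys ▸ hk)
              rw [if_pos hc, PySem.Dict.items_insert_of_contains F v hc, hF, List.map_map]
              refine List.map_congr_left (fun name _ => ?_)
              rw [hm name]
              by_cases hnk : name = k
              · subst hnk; simp
              · 
                have h2 : (k == name) = false := beq_eq_false_iff_ne.mpr (Ne.symm hnk)
                simp [h2, hnk]
            · have hc : F.contains k = false := by
                rw [Bool.eq_false_iff]
                intro hc
                exact hk (hkeys ▸ (PySem.Dict.contains_iff_mem_keys F k).1 hc)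
              rw [if_neg (by simp [hc]), hF]
              refine List.map_congr_left (fun name hname => ?_)
              rw [hm name]
              have h2 : (k == name) = false := beq_eq_false_iff_ne.mpr (fun h => hk (h ▸ hname))
              rw [h2]; rfl
          -- end [k, v]
      · rw [if_neg hin, hF]
        refine List.map_congr_left (fun n _ => ?_)
        have hm : pvMatch? item n = none := by unfold pvMatch?; rw [if_neg hin]
        rw [hm]; rfl
    rw [List.foldl_cons, ih (parseMorphStepA F item) _ hstep]
    refine List.map_congr_left (fun name _ => ?_)
    rw [List.reverse_cons, pvFindSome?_append_single]
    cases h1 : rest.reverse.findSome? (fun it => pvMatch? it name) <;>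
      cases h2 : pvMatch? item name <;> simp

-- ===== VERDICT (by name: the statement is the Claim_ definition above) =====
theorem parse_morph_spec : Claim_equal_parse_morph := by
  intro morph_str _
  unfold Spec_parse_morph parse_morph parse_morph_alt
  cases hsp : PySem.Str.split? morph_str "|" with
  | none => rfl
  | some items =>
    simp only
    rw [pvFold_char items _ (fun _ => "") (by decide)]
    refine List.map_congr_left (fun name _ => ?_)
    rw [pvValueOf_eq]
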